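-- pv_equiv track=rewrite | github.com/JonSeijo/project-euler | problems 80-89/problem_85.py | mejor_r
-- ===== SOURCE A (Python) =====
-- OBJ = 2000000
--
-- def cant(f, c):
-- 	return f*(f+1)//2 * c*(c+1)//2
--
-- def mejor_r(f):
-- 	lo = 1
-- 	hi = f
-- 	while lo + 1 < hi:
-- 		m = (lo + hi) // 2
-- 		if (cant(f, m) < OBJ):
-- 			lo = m
-- 		else:
-- 			hi = m
--
-- 	return lo
-- ===== SOURCE B (Python) =====
-- OBJ = 2000000
--
-- def cant(f, c):
--     return f*(f+1)//2 * c*(c+1)//2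
--
-- def mejor_r(f):
--     c = 1
--     while c < f - 1 and cant(f, c + 1) < OBJ:
--         c += 1
--     return c
-- ===== Notes on version B (the rewrite author's own statement) =====
-- stated objective: simpler
-- what changed: Replaces the binary search over [1,f] with a forward linear scan that increments c while c < f-1 and cant(f,c+1) < OBJ; correct because cant(f,c) is monotone in c.
import Mathlib
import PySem

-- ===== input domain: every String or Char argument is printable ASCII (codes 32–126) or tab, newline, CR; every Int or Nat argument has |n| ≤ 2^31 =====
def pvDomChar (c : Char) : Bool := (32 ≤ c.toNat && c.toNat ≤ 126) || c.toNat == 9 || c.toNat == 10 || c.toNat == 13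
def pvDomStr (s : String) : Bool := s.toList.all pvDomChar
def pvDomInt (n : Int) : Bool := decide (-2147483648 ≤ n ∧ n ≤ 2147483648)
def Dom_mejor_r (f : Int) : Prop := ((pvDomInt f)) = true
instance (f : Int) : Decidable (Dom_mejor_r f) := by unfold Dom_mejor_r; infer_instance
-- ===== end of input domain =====

-- B replaces A's binary search with a forward linear scan over the column count (simpler; same values since cant is monotone).

-- ===== PORT A =====
def pvOBJ : Int := 2000000

def cantP (f c : Int) : Int :=
  PySem.Int.floordiv (PySem.Int.floordiv (f * (f + 1)) 2 * c * (c + 1)) 2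

-- the 'while lo + 1 < hi' loop of A, state (lo, hi)
def loopA (f lo hi : Int) : Int :=
  if h : lo + 1 < hi then
    if cantP f (PySem.Int.floordiv (lo + hi) 2) < pvOBJ then
      loopA f (PySem.Int.floordiv (lo + hi) 2) hi
    else
      loopA f lo (PySem.Int.floordiv (lo + hi) 2)
  else lo
termination_by (hi - lo).toNat
decreasing_by
  · have h2 : PySem.Int.floordiv (lo + hi) 2 = (lo + hi) / 2 :=
      PySem.Int.floordiv_eq_ediv_of_pos (by omega)
    simp only [h2]; omega
  · have h2 : PySem.Int.floordiv (lo + hi) 2 = (lo + hi) / 2 :=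
      PySem.Int.floordiv_eq_ediv_of_pos (by omega)
    simp only [h2]; omega

def mejor_r (f : Int) : Int := loopA f 1 f

-- ===== PORT B =====
-- the 'while c < f - 1 and cant(f, c+1) < OBJ' scan of B
def loopB (f c : Int) : Int :=
  if h : c < f - 1 ∧ cantP f (c + 1) < pvOBJ then loopB f (c + 1) else c
termination_by (f - 1 - c).toNat
decreasing_by omega

def mejor_r_alt (f : Int) : Int := loopB f 1

-- ===== PRECONDITION & SPEC =====
def Spec_mejor_r (f : Int) (out : Int) : Prop := out = mejor_r_alt f
instance (f : Int) (out : Int) : Decidable (Spec_mejor_r f out) := by unfold Spec_mejor_r; infer_instance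

-- ===== CLAIM (what is proved, stated in full; the proofs are below) =====
def Claim_equal_mejor_r : Prop := ∀ (f : Int), Dom_mejor_r f → Spec_mejor_r f (mejor_r f)

-- ===== LEMMAS AND PROOFS =====

theorem cantP_mono (f : Int) {c c' : Int} (h1 : 1 ≤ c) (h : c ≤ c') :
    cantP f c ≤ cantP f c' := by
  unfold cantP
  have hT : 0 ≤ PySem.Int.floordiv (f * (f + 1)) 2 := by
    have hnn : 0 ≤ f * (f + 1) := by nlinarith [sq_nonneg (2 * f + 1)]
    have := PySem.Int.floordiv_eq_ediv_of_pos (a := f * (f + 1)) (b := 2) (by omega)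
    rw [this]
    exact Int.ediv_nonneg hnn (by omega)
  set T := PySem.Int.floordiv (f * (f + 1)) 2 with hTdef
  have hkey : c * (c + 1) ≤ c' * (c' + 1) := by nlinarith
  have hmul : T * c * (c + 1) ≤ T * c' * (c' + 1) := by
    calc T * c * (c + 1) = T * (c * (c + 1)) := by ring
      _ ≤ T * (c' * (c' + 1)) := mul_le_mul_of_nonneg_left hkey hT
      _ = T * c' * (c' + 1) := by ring
  rw [PySem.Int.floordiv_eq_ediv_of_pos (by omega : (0:Int) < 2),
      PySem.Int.floordiv_eq_ediv_of_pos (by omega : (0:Int) < 2)]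
  exact Int.ediv_le_ediv (by omega) hmul

-- walking B's scan forward past any m with cant(f,m) < OBJ
theorem loopB_advance (f : Int) (m : Int) (hm : m ≤ f - 1) (hOBJ : cantP f m < pvOBJ) :
    ∀ c : Int, 1 ≤ c → c ≤ m → loopB f c = loopB f m := by
  intro c hc hcm
  by_cases heq : c = m
  · rw [heq]
  · have hlt : c < m := lt_of_le_of_ne hcm heq
    have hstep : loopB f c = loopB f (c + 1) := by
      rw [loopB]
      have : c < f - 1 ∧ cantP f (c + 1) < pvOBJ :=
        ⟨by omega, lt_of_le_of_lt (cantP_mono f (by omega) (by omega)) hOBJ⟩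
      simp [this]
    rw [hstep]
    exact loopB_advance f m hm hOBJ (c + 1) (by omega) (by omega)
termination_by c => (m - c).toNat
decreasing_by omega

-- A's loop equals B's scan under the binary-search invariant
theorem loopA_eq_loopB (f : Int) : ∀ n lo hi, (hi - lo).toNat = n →
    1 ≤ lo → lo < hi → hi ≤ f → (hi = f ∨ pvOBJ ≤ cantP f hi) →
    loopA f lo hi = loopB f lo := by
  intro n
  induction n using Nat.strong_induction_on with
  | _ n ih =>
    intro lo hi hn hlo hlh hhf hinv
    rw [loopA]
    by_cases h : lo + 1 < hi
    · have h2 : PySem.Int.floordiv (lo + hi) 2 = (lo + hi) / 2 :=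
        PySem.Int.floordiv_eq_ediv_of_pos (by omega)
      set m := PySem.Int.floordiv (lo + hi) 2 with hmdef
      have hm1 : lo < m := by rw [h2]; omega
      have hm2 : m < hi := by rw [h2]; omega
      by_cases hc : cantP f m < pvOBJ
      · simp only [h, dif_pos, hc, if_pos]
        rw [ih (hi - m).toNat (by omega) m hi rfl (by omega) hm2 hhf hinv]
        exact (loopB_advance f m (by omega) hc lo hlo (by omega)).symm
      · simp only [h, dif_pos, hc, if_neg, not_false_iff]
        exact ih (m - lo).toNat (by omega) lo m rfl hlo hm1 (by omega)
          (Or.inr (by omega))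
    · simp only [h, dif_neg, not_false_iff]
      -- hi = lo + 1; B's scan stops immediately at lo
      rw [loopB]
      have : ¬ (lo < f - 1 ∧ cantP f (lo + 1) < pvOBJ) := by
        rcases hinv with hf | hge
        · omega
        · intro ⟨_, hlt⟩
          have : cantP f hi ≤ cantP f (lo + 1) := cantP_mono f (by omega) (by omega)
          omega
      simp [this]

-- ===== VERDICT (by name: the statement is the Claim_ definition above) =====
theorem mejor_r_spec : Claim_equal_mejor_r := by
  intro f _
  unfold Spec_mejor_r mejor_r mejor_r_alt
  by_cases h : 1 + 1 < f
  · exact loopA_eq_loopB f (f - 1).toNat 1 f (by omega) (by omega) (by omega)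
      (le_refl f) (Or.inl rfl)
  · rw [loopA, loopB]
    simp [show ¬ ((2:Int) < f) by omega, show ¬ ((1:Int) < f - 1) by omega]
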